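-- pv_equiv track=rewrite | github.com/R00T-Kim/SCOUT | src/aiedge/graph.py | _service_matches_observation
-- ===== SOURCE A (Python) =====
-- def _service_matches_observation(
--     endpoint_ports: list[int],
--     endpoint_protocol: str,
--     observed_ports: list[tuple[int, str]],
-- ) -> bool:
--     if not endpoint_ports:
--         return True if observed_ports else False
--     service_protocols = {p: True for p, _ in observed_ports}
--     if not observed_ports:
--         return False
--     for port in endpoint_ports:
--         for observed_port, observed_proto in observed_ports:
--             if observed_port != port:
--                 continue
--             if endpoint_protocol in {"unknown", "tcp"} and observed_proto in {"tcp", "unknown"}: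
--                 return True
--             if endpoint_protocol == observed_proto:
--                 return True
--     return False
-- ===== SOURCE B (Python) =====
-- def _service_matches_observation(
--     endpoint_ports: list[int],
--     endpoint_protocol: str,
--     observed_ports: list[tuple[int, str]],
-- ) -> bool:
--     if not endpoint_ports:
--         return bool(observed_ports)
--     loose = endpoint_protocol in ("unknown", "tcp")
--     compatible = {
--         p
--         for p, proto in observed_ports
--         if (loose and proto in ("tcp", "unknown")) or proto == endpoint_protocol
--     }
--     return any(p in compatible for p in endpoint_ports)
-- ===== Notes on version B (the rewrite author's own statement) =====
-- stated objective: faster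
-- what changed: Replaces the nested port-by-port scan (with a dead dict and a redundant empty-observation guard) by one pass that filters observed ports into a set of protocol-compatible ports (the compatibility test is hoisted since it depends only on the fixed endpoint_protocol), followed by a single membership check over endpoint_ports.
import Mathlib
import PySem

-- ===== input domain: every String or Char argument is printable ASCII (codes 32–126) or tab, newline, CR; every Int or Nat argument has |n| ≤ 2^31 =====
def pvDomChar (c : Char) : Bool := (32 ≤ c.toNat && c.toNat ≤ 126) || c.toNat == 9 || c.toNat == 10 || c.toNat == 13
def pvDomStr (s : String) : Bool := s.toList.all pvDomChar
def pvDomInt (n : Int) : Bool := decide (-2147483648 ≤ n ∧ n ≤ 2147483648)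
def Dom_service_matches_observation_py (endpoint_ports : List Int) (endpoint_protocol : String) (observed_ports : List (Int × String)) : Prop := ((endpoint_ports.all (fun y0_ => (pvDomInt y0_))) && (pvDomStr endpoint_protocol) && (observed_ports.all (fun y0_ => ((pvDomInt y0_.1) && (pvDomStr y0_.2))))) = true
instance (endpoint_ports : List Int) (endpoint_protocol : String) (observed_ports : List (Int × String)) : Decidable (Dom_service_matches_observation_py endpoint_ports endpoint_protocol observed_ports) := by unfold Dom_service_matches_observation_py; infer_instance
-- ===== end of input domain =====

-- B replaces A's nested port-by-port scan by one filtering pass building the set of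
-- protocol-compatible observed ports, then a single membership check (objective: simpler).

-- ===== PORT A =====
-- inner 'for observed_port, observed_proto in observed_ports' loop with early return
def smObsLoop (endpoint_protocol : String) (port : Int) : List (Int × String) → Bool
  | [] => false
  | (observed_port, observed_proto) :: rest =>
    if observed_port ≠ port then smObsLoop endpoint_protocol port rest
    else if (endpoint_protocol == "unknown" || endpoint_protocol == "tcp")
            && (observed_proto == "tcp" || observed_proto == "unknown") then true
    else if endpoint_protocol == observed_proto then true
    else smObsLoop endpoint_protocol port rest

-- outer 'for port in endpoint_ports' loop with early return
def smPortLoop (endpoint_protocol : String) (observed_ports : List (Int × String)) : List Int → Bool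
  | [] => false
  | port :: rest =>
    if smObsLoop endpoint_protocol port observed_ports then true
    else smPortLoop endpoint_protocol observed_ports rest

def service_matches_observation_py (endpoint_ports : List Int) (endpoint_protocol : String) (observed_ports : List (Int × String)) : Bool :=
  if endpoint_ports.isEmpty then (if !observed_ports.isEmpty then true else false)
  else
    -- dead 'service_protocols' dict comprehension of A, kept faithfully
    let _service_protocols : PySem.Dict Int Bool :=
      observed_ports.foldl (fun d pr => PySem.Dict.insert d pr.1 true) (PySem.Dict.empty : PySem.Dict Int Bool)
    if observed_ports.isEmpty then false
    else smPortLoop endpoint_protocol observed_ports endpoint_ports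

-- ===== PORT B =====
def smCompat (loose : Bool) (endpoint_protocol proto : String) : Bool :=
  (loose && (proto == "tcp" || proto == "unknown")) || proto == endpoint_protocol

def service_matches_observation_py_alt (endpoint_ports : List Int) (endpoint_protocol : String) (observed_ports : List (Int × String)) : Bool :=
  if endpoint_ports.isEmpty then !observed_ports.isEmpty
  else
    let loose := endpoint_protocol == "unknown" || endpoint_protocol == "tcp"
    let compatible : PySem.Set Int :=
      PySem.Set.ofList ((observed_ports.filter (fun pr => smCompat loose endpoint_protocol pr.2)).map Prod.fst)
    endpoint_ports.any (fun p => PySem.Set.contains compatible p)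

-- ===== PRECONDITION & SPEC =====
def Spec_service_matches_observation_py (endpoint_ports : List Int) (endpoint_protocol : String) (observed_ports : List (Int × String)) (out : Bool) : Prop := out = service_matches_observation_py_alt endpoint_ports endpoint_protocol observed_ports
instance (endpoint_ports : List Int) (endpoint_protocol : String) (observed_ports : List (Int × String)) (out : Bool) : Decidable (Spec_service_matches_observation_py endpoint_ports endpoint_protocol observed_ports out) := by unfold Spec_service_matches_observation_py; infer_instance

-- ===== CLAIM (what is proved, stated in full; the proofs are below) =====
def Claim_equal_service_matches_observation_py : Prop := ∀ (endpoint_ports : List Int) (endpoint_protocol : String) (observed_ports : List (Int × String)), Dom_service_matches_observation_py endpoint_ports endpoint_protocol observed_ports → Spec_service_matches_observation_py endpoint_ports endpoint_protocol observed_ports (service_matches_observation_py endpoint_ports endpoint_protocol observed_ports)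

-- ===== LEMMAS AND PROOFS =====

-- A's inner scan over observed_ports is an 'any' over port-and-protocol compatibility
theorem smObsLoop_eq_any (ep : String) (port : Int) (obs : List (Int × String)) :
    smObsLoop ep port obs =
      obs.any (fun pr => (pr.1 == port) && smCompat (ep == "unknown" || ep == "tcp") ep pr.2) := by
  induction obs with
  | nil => rfl
  | cons hd tl ih =>
    obtain ⟨op, opr⟩ := hd
    rw [smObsLoop]
    simp only [List.any_cons]
    rw [← ih]
    by_cases hp : op = port
    · subst hp
      rw [if_neg (fun h => h rfl)]
      have hself : (op == op) = true := by rw [beq_iff_eq]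
      rw [hself, Bool.true_and, smCompat]
      cases hc1 : ((ep == "unknown" || ep == "tcp") && (opr == "tcp" || opr == "unknown")) with
      | true =>
        rw [if_pos rfl, Bool.true_or, Bool.true_or]
      | false =>
        rw [if_neg Bool.false_ne_true, Bool.false_or]
        cases hc2 : (ep == opr) with
        | true =>
          have h' : (opr == ep) = true := by
            rw [beq_iff_eq] at hc2 ⊢; exact hc2.symm
          rw [if_pos rfl, h', Bool.true_or]
        | false =>
          have h' : (opr == ep) = false := by
            rw [beq_eq_false_iff_ne] at hc2 ⊢; exact fun h => hc2 h.symm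
          rw [if_neg Bool.false_ne_true, h', Bool.false_or]
    · rw [if_pos hp]
      have hop : (op == port) = false := beq_eq_false_iff_ne.mpr hp
      rw [hop, Bool.false_and, Bool.false_or]

-- B's membership in the precomputed compatible set is the same 'any'
theorem contains_compat_eq (ep : String) (p : Int) (obs : List (Int × String)) (loose : Bool) :
    PySem.Set.contains
        (PySem.Set.ofList ((obs.filter (fun pr => smCompat loose ep pr.2)).map Prod.fst)) p =
      obs.any (fun pr => (pr.1 == p) && smCompat loose ep pr.2) := by
  rw [Bool.eq_iff_iff, PySem.Set.contains_iff, PySem.Set.mem_ofList, List.any_eq_true]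
  simp only [List.mem_map, List.mem_filter]
  constructor
  · rintro ⟨pr, ⟨hm, hc⟩, hp⟩
    exact ⟨pr, hm, by simp [hp, hc]⟩
  · rintro ⟨pr, hm, h⟩
    simp only [Bool.and_eq_true, beq_iff_eq] at h
    exact ⟨pr, ⟨hm, h.2⟩, h.1⟩

theorem smPortLoop_eq_any (ep : String) (obs : List (Int × String)) (eps : List Int) :
    smPortLoop ep obs eps =
      eps.any (fun p => PySem.Set.contains
        (PySem.Set.ofList ((obs.filter (fun pr => smCompat (ep == "unknown" || ep == "tcp") ep pr.2)).map Prod.fst)) p) := by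
  induction eps with
  | nil => rfl
  | cons p rest ih =>
    simp only [smPortLoop, List.any_cons, contains_compat_eq, smObsLoop_eq_any, ih]
    cases h : obs.any (fun pr => (pr.1 == p) && smCompat (ep == "unknown" || ep == "tcp") ep pr.2) <;> simp

-- ===== VERDICT (by name: the statement is the Claim_ definition above) =====
theorem service_matches_observation_py_spec : Claim_equal_service_matches_observation_py := by
  intro eps ep obs _
  unfold Spec_service_matches_observation_py service_matches_observation_py service_matches_observation_py_alt
  by_cases he : eps.isEmpty
  · cases obs <;> simp [he]
  · rw [if_neg he, if_neg he]
    by_cases ho : obs.isEmpty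
    · have hnil : obs = [] := List.isEmpty_iff.1 ho
      subst hnil
      simp
    · rw [if_neg ho]
      exact smPortLoop_eq_any ep obs eps
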